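-- pv_equiv track=rewrite | github.com/pmpv05/proyectoTeoria | Algoritmos y generación de pruebas/LCS_Instrumentados.py | BottomLCS_Inst
-- ===== SOURCE A (Python) =====
-- def Matrix(numero_filas, numero_columnas):
--     return [[None]*numero_columnas for i in range(numero_filas)]
--
-- def BottomLCS_Inst(A, B):
--     """
--     Cálcula la matriz de distancias a partir de 2 strings.
--     Iterativo. Memoriza resultados previos.
--     DINAMICO: TIEMPO POLINOMICO
--         A = Primer string
--         B = Segundo string
--     """
--     accesosMatriz = 0
--     len_A = len(A)
--     len_B = len(B)
--     M = Matrix(len_A+1, len_B+1)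
--
--     for a in range(len_A+1):
--         for b in range(len_B+1):
--             if a == 0 or b == 0:
--                 accesosMatriz += 1
--                 M[a][b] = 0
--             elif A[a-1] == B[b-1]:
--                 accesosMatriz += 1
--                 M[a][b] = M[a-1][b-1] + 1
--             else:
--                 accesosMatriz += 1
--                 M[a][b] = max(M[a-1][b], M[a][b-1])
--
--     return accesosMatriz
-- ===== SOURCE B (Python) =====
-- def BottomLCS_Inst(A, B):
--     # Closed form: the loop body increments the counter exactly once per
--     # (a, b) cell, for a in range(len(A)+1) and b in range(len(B)+1).
--     return (len(A) + 1) * (len(B) + 1)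
-- ===== Notes on version B (the rewrite author's own statement) =====
-- stated objective: faster
-- what changed: Replaced the full O(n*m) DP matrix fill with the closed form (len(A)+1)*(len(B)+1), since the counter is incremented exactly once per cell regardless of branch.
import Mathlib
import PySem

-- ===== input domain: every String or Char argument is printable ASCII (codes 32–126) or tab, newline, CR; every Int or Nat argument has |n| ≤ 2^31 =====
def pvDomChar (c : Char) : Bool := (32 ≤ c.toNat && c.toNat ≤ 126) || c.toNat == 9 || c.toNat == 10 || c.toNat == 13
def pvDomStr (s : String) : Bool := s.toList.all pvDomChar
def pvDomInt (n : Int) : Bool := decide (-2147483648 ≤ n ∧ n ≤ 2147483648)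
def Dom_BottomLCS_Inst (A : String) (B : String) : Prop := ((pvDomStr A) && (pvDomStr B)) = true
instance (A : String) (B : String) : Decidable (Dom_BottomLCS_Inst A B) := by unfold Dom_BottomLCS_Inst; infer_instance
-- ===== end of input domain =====

-- B replaces the O(n*m) matrix-filling loops by the closed form (len A + 1)*(len B + 1): faster.

-- ===== PORT A =====
-- helper Matrix(nr, nc) = [[None]*nc for i in range(nr)]
def pvMatrix (nr nc : Int) : List (List (Option Int)) :=
  (PySem.List.pyRange 0 nr 1).map (fun _ => List.replicate nc.toNat none)

-- M[a][b] = v; indices are always in range when called by the port (loop bounds)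
def pvMset (M : List (List (Option Int))) (a b : Int) (v : Option Int) :
    List (List (Option Int)) :=
  M.set a.toNat ((M.getD a.toNat []).set b.toNat v)

-- read M[a][b]; in the port the read cell has always been written already (so it is `some _`
-- in every reachable read; Python would raise on None and never does here)
def pvMget (M : List (List (Option Int))) (a b : Int) : Option Int :=
  (M.getD a.toNat []).getD b.toNat none

def BottomLCS_Inst (A : String) (B : String) : Int :=
  let accesosMatriz : Int := 0
  let len_A := PySem.Str.len A
  let len_B := PySem.Str.len B
  let M0 := pvMatrix (len_A + 1) (len_B + 1)
  let st :=
    (PySem.List.pyRange 0 (len_A + 1) 1).foldl (fun st a =>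
      (PySem.List.pyRange 0 (len_B + 1) 1).foldl (fun st b =>
        if a = 0 ∨ b = 0 then
          (st.1 + 1, pvMset st.2 a b (some 0))
        else if PySem.Str.pyGet? A (a - 1) = PySem.Str.pyGet? B (b - 1) then
          (st.1 + 1, pvMset st.2 a b (some ((pvMget st.2 (a - 1) (b - 1)).getD 0 + 1)))
        else
          (st.1 + 1, pvMset st.2 a b
            (some (max ((pvMget st.2 (a - 1) b).getD 0) ((pvMget st.2 a (b - 1)).getD 0)))))
        st)
      (accesosMatriz, M0)
  st.1

-- ===== PORT B =====
def BottomLCS_Inst_alt (A : String) (B : String) : Int :=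
  (PySem.Str.len A + 1) * (PySem.Str.len B + 1)

-- ===== PRECONDITION & SPEC =====
def Spec_BottomLCS_Inst (A : String) (B : String) (out : Int) : Prop := out = BottomLCS_Inst_alt A B
instance (A : String) (B : String) (out : Int) : Decidable (Spec_BottomLCS_Inst A B out) := by unfold Spec_BottomLCS_Inst; infer_instance

-- ===== CLAIM (what is proved, stated in full; the proofs are below) =====
def Claim_equal_BottomLCS_Inst : Prop := ∀ (A : String) (B : String), Dom_BottomLCS_Inst A B → Spec_BottomLCS_Inst A B (BottomLCS_Inst A B)

-- ===== LEMMAS AND PROOFS =====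

-- a fold whose step adds the constant c to the first component adds c * length in total
theorem pv_fst_foldl_addc {σ : Type} (g : (Int × σ) → Int → (Int × σ)) (c : Int)
    (h : ∀ st x, (g st x).1 = st.1 + c) :
    ∀ (l : List Int) (st : Int × σ), (l.foldl g st).1 = st.1 + c * l.length := by
  intro l
  induction l with
  | nil => intro st; simp
  | cons x t ih =>
    intro st
    simp only [List.foldl_cons, ih, h, List.length_cons]
    push_cast
    ring

-- ===== VERDICT (by name: the statement is the Claim_ definition above) =====
theorem BottomLCS_Inst_spec : Claim_equal_BottomLCS_Inst := by
  intro A B _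
  unfold Spec_BottomLCS_Inst BottomLCS_Inst BottomLCS_Inst_alt
  have hA : (0:Int) ≤ PySem.Str.len A := by simp [PySem.Str.len_eq]
  have hB : (0:Int) ≤ PySem.Str.len B := by simp [PySem.Str.len_eq]
  rw [pv_fst_foldl_addc _ (PySem.Str.len B + 1)
    (by
      intro st a
      rw [pv_fst_foldl_addc _ 1
        (by intro st b; split_ifs <;> rfl)]
      simp [PySem.List.length_pyRange_one])]
  simp [PySem.List.length_pyRange_one]
  ring
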